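-- pv_equiv track=rewrite | github.com/KhoiVo1510/python100 | 100python/_68_.py | ex67
-- ===== SOURCE A (Python) =====
-- def ex67(lst):
--     even = []
--     odd = []
--     zero = []
--     for num in lst:
--         if num == 0:
--             zero.append(num)
--         elif num % 2 == 0:
--             even.append(num)
--         else:
--             odd.append(num)
--     return (even + zero + odd)
-- ===== SOURCE B (Python) =====
-- def ex67(lst):
--     def key(num):
--         if num == 0:
--             return 1
--         elif num % 2 == 0:
--             return 0
--         else:
--             return 2
--     return sorted(lst, key=key)
-- ===== Notes on version B (the rewrite author's own statement) =====
-- stated objective: idiomatic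
-- what changed: B replaces A's three manually-built buckets and concatenation with a single stable sorted() call keyed by category (nonzero even -> 0, zero -> 1, odd -> 2), relying on sort stability to preserve A's within-category order.
import Mathlib
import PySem

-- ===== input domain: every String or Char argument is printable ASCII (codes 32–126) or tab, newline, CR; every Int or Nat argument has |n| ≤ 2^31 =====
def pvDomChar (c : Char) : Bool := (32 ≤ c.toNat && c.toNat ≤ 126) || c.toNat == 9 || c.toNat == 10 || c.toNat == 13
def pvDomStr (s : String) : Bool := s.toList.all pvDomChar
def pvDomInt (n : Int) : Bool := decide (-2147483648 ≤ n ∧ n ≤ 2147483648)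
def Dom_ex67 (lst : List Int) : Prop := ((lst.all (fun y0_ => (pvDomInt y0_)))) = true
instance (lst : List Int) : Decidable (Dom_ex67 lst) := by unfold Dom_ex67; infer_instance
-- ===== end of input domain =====

-- B replaces A's three manual buckets with one stable sort keyed by category (idiomatic; same return value, no speed claim).


-- ===== PORT A =====
-- state = (even, odd, zero), in the order A declares the lists; result = even ++ zero ++ odd
def ex67 (lst : List Int) : List Int :=
  let s := lst.foldl (fun (acc : List Int × List Int × List Int) num =>
    if num == 0 then (acc.1, acc.2.1, acc.2.2 ++ [num])
    else if PySem.Int.mod num 2 == 0 then (acc.1 ++ [num], acc.2.1, acc.2.2)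
    else (acc.1, acc.2.1 ++ [num], acc.2.2)) ([], [], [])
  s.1 ++ s.2.2 ++ s.2.1

-- ===== PORT B =====
-- B's sort key: nonzero even -> 0, zero -> 1, odd -> 2
def ex67Key (num : Int) : Int :=
  if num == 0 then 1 else if PySem.Int.mod num 2 == 0 then 0 else 2

def ex67_alt (lst : List Int) : List Int :=
  PySem.List.sorted lst ex67Key

-- ===== PRECONDITION & SPEC =====
def Spec_ex67 (lst : List Int) (out : List Int) : Prop := out = ex67_alt lst
instance (lst : List Int) (out : List Int) : Decidable (Spec_ex67 lst out) := by unfold Spec_ex67; infer_instance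

-- ===== CLAIM (what is proved, stated in full; the proofs are below) =====
def Claim_equal_ex67 : Prop := ∀ (lst : List Int), Dom_ex67 lst → Spec_ex67 lst (ex67 lst)

-- ===== LEMMAS AND PROOFS =====

-- insertBy skips over a prefix none of whose elements x goes before
theorem ex67_insertBy_append {α : Type} (before : α → α → Bool) (x : α) (l1 l2 : List α)
    (h : ∀ y ∈ l1, before x y = false) :
    PySem.List.insertBy before x (l1 ++ l2) = l1 ++ PySem.List.insertBy before x l2 := by
  induction l1 with
  | nil => simp
  | cons y ys ih =>
      simp only [List.cons_append, PySem.List.insertBy, h y (by simp)]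
      simp only [Bool.false_eq_true, if_false, List.cons.injEq, true_and]
      exact ih (fun z hz => h z (by simp [hz]))

-- insertBy puts x in front of a list every element of which x goes before
theorem ex67_insertBy_front {α : Type} (before : α → α → Bool) (x : α) (l : List α)
    (h : ∀ y ∈ l, before x y = true) :
    PySem.List.insertBy before x l = x :: l := by
  cases l with
  | nil => simp [PySem.List.insertBy]
  | cons y ys => simp [PySem.List.insertBy, h y (by simp)]

-- loop invariant: the insertion-sort fold over a bucketed accumulator equals A's bucket fold
theorem ex67_main (lst : List Int) : ∀ (E O Z : List Int),
    (∀ y ∈ E, ex67Key y = 0) → (∀ y ∈ O, ex67Key y = 2) → (∀ y ∈ Z, ex67Key y = 1) →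
    lst.foldl (fun acc x => PySem.List.insertBy (fun a b => decide (ex67Key a < ex67Key b)) x acc)
      (E ++ Z ++ O)
    = (fun s : List Int × List Int × List Int => s.1 ++ s.2.2 ++ s.2.1)
      (lst.foldl (fun (acc : List Int × List Int × List Int) num =>
        if num == 0 then (acc.1, acc.2.1, acc.2.2 ++ [num])
        else if PySem.Int.mod num 2 == 0 then (acc.1 ++ [num], acc.2.1, acc.2.2)
        else (acc.1, acc.2.1 ++ [num], acc.2.2)) (E, O, Z)) := by
  induction lst with
  | nil => intro E O Z _ _ _; rfl
  | cons x xs ih =>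
      intro E O Z hE hO hZ
      by_cases hx0 : x = 0
      · -- key x = 1 : goes after E and Z, before O
        have hk : ex67Key x = 1 := by
          unfold ex67Key; rw [if_pos (by simp [hx0])]
        have step :
            PySem.List.insertBy (fun a b => decide (ex67Key a < ex67Key b)) x (E ++ Z ++ O)
              = E ++ (Z ++ [x]) ++ O := by
          rw [List.append_assoc,
            ex67_insertBy_append _ _ E (Z ++ O) (fun y hy => by simp [hk, hE y hy]),
            ex67_insertBy_append _ _ Z O (fun y hy => by simp [hk, hZ y hy]),
            ex67_insertBy_front _ _ O (fun y hy => by simp [hk, hO y hy])]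
          simp
        rw [List.foldl_cons, List.foldl_cons, step,
          if_pos (show (x == 0) = true by simp [hx0])]
        exact ih E O (Z ++ [x]) hE hO
          (List.forall_mem_append.2 ⟨hZ, by simpa using hk⟩)
      · by_cases hx2 : PySem.Int.mod x 2 = 0
        · -- key x = 0 : goes after E, before Z and O
          have hk : ex67Key x = 0 := by
            unfold ex67Key; rw [if_neg (by simp [hx0]), if_pos (by simpa using hx2)]
          have step :
              PySem.List.insertBy (fun a b => decide (ex67Key a < ex67Key b)) x (E ++ Z ++ O)
                = (E ++ [x]) ++ Z ++ O := by
            rw [List.append_assoc,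
              ex67_insertBy_append _ _ E (Z ++ O) (fun y hy => by simp [hk, hE y hy]),
              ex67_insertBy_front _ _ (Z ++ O)
                (List.forall_mem_append.2
                  ⟨fun y hy => by simp [hk, hZ y hy],
                   fun y hy => by simp [hk, hO y hy]⟩)]
            simp
          rw [List.foldl_cons, List.foldl_cons, step,
            if_neg (show ¬ ((x == 0) = true) by simp [hx0]),
            if_pos (show (PySem.Int.mod x 2 == 0) = true by simpa using hx2)]
          exact ih (E ++ [x]) O Z
            (List.forall_mem_append.2 ⟨hE, by simpa using hk⟩) hO hZ
        · -- key x = 2 : goes after everything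
          have hk : ex67Key x = 2 := by
            unfold ex67Key; rw [if_neg (by simp [hx0]), if_neg (by simpa using hx2)]
          have step :
              PySem.List.insertBy (fun a b => decide (ex67Key a < ex67Key b)) x (E ++ Z ++ O)
                = E ++ Z ++ (O ++ [x]) := by
            rw [PySem.List.insertBy_of_forall_not_before _ _ (E ++ Z ++ O)
              (List.forall_mem_append.2
                ⟨List.forall_mem_append.2
                  ⟨fun y hy => by simp [hk, hE y hy],
                   fun y hy => by simp [hk, hZ y hy]⟩,
                 fun y hy => by simp [hk, hO y hy]⟩)]
            simp
          rw [List.foldl_cons, List.foldl_cons, step,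
            if_neg (show ¬ ((x == 0) = true) by simp [hx0]),
            if_neg (show ¬ ((PySem.Int.mod x 2 == 0) = true) by simpa using hx2)]
          exact ih E (O ++ [x]) Z hE
            (List.forall_mem_append.2 ⟨hO, by simpa using hk⟩) hZ

-- ===== VERDICT (by name: the statement is the Claim_ definition above) =====
theorem ex67_spec : Claim_equal_ex67 := by
  intro lst _
  show ex67 lst = ex67_alt lst
  unfold ex67 ex67_alt
  rw [PySem.List.sorted_eq_foldl_insertBy]
  exact (ex67_main lst [] [] [] (by simp) (by simp) (by simp)).symm
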